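-- pv_equiv track=rewrite | github.com/zinkozapper/python_projects | ProjectReliquery/ProjectReliquery.py | generate_date_color_count
-- ===== SOURCE A (Python) =====
-- def generate_date_color_count(rows_with_dates_colors):
--     date_color_count_dict = {}
--
--     for row_data in rows_with_dates_colors:
--         date = row_data['date']
--         color = row_data['color']
--
--         if date not in date_color_count_dict:
--             date_color_count_dict[date] = {}
--
--         if color in date_color_count_dict[date]:
--             date_color_count_dict[date][color] += 1
--         else:
--             date_color_count_dict[date][color] = 1
--
--     return date_color_count_dict
-- ===== SOURCE B (Python) =====
-- def generate_date_color_count(rows_with_dates_colors):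
--     # Pass 1: flat count of (date, color) pairs; Pass 2: unflatten into the nested dict.
--     pairs = [(row['date'], row['color']) for row in rows_with_dates_colors]
--     flat = {}
--     for pair in pairs:
--         flat[pair] = flat.get(pair, 0) + 1
--     result = {}
--     for (date, color), count in flat.items():
--         result.setdefault(date, {})[color] = count
--     return result
-- ===== Notes on version B (the rewrite author's own statement) =====
-- stated objective: alternative
-- what changed: A builds the nested {date:{color:count}} dict incrementally in one pass with per-row membership tests; B instead counts flat (date,color) pairs in one dictionary and then unflattens that counter into the nested dict in a second pass.
import Mathlib
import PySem

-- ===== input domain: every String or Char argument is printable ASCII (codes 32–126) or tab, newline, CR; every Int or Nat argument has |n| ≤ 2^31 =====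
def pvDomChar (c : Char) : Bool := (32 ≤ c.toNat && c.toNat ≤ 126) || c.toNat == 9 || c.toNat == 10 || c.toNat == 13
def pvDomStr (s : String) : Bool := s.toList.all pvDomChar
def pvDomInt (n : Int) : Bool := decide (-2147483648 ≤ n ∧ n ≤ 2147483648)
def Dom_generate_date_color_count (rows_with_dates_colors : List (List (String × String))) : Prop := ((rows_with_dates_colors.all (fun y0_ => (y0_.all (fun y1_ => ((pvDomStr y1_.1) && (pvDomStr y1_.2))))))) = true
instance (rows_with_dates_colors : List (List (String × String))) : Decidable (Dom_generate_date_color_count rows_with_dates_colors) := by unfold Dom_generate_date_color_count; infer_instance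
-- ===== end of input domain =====

-- B counts flat (date, color) pairs first and unflattens afterwards, instead of A's
-- incremental nested-dict pass; equal return values (same nested association lists).

-- shared helper: row[k] on a Python dict given as an association list (first match);
-- the KeyError case (no "date"/"color" key) is excluded by Pre_, the "" default is never used there
def pvRowGet (row : List (String × String)) (k : String) : String :=
  ((PySem.Dict.mk row).get? k).getD ""

-- ===== PORT A =====
def generate_date_color_count (rows_with_dates_colors : List (List (String × String))) : List (String × List (String × Int)) :=
  (rows_with_dates_colors.foldl
    (fun acc row =>
      let date := pvRowGet row "date"
      let color := pvRowGet row "color"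
      let acc1 := if acc.contains date then acc else acc.insert date PySem.Dict.empty
      let inner := acc1.getD date PySem.Dict.empty
      if inner.contains color then
        acc1.insert date (inner.insert color (inner.getD color 0 + 1))
      else
        acc1.insert date (inner.insert color 1))
    (PySem.Dict.empty : PySem.Dict String (PySem.Dict String Int))).items.map
    (fun p => (p.1, p.2.items))

-- ===== PORT B =====
def generate_date_color_count_alt (rows_with_dates_colors : List (List (String × String))) : List (String × List (String × Int)) :=
  let pairs := rows_with_dates_colors.map (fun row => (pvRowGet row "date", pvRowGet row "color"))
  let flat := pairs.foldl (fun f pair => f.insert pair (f.getD pair 0 + 1))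
    (PySem.Dict.empty : PySem.Dict (String × String) Int)
  -- result.setdefault(date, {})[color] = count  ==  overwrite result[date] with its inner dict extended at color
  let result := flat.items.foldl
    (fun res q => res.insert q.1.1 ((res.getD q.1.1 PySem.Dict.empty).insert q.1.2 q.2))
    (PySem.Dict.empty : PySem.Dict String (PySem.Dict String Int))
  result.items.map (fun p => (p.1, p.2.items))

-- ===== PRECONDITION & SPEC =====
-- Pre_ excludes exactly the rows lacking a "date" or "color" key, on which the Python A raises KeyError
def Pre_generate_date_color_count (rows_with_dates_colors : List (List (String × String))) : Prop :=
  (rows_with_dates_colors.all (fun row => row.any (fun p => p.1 == "date") && row.any (fun p => p.1 == "color"))) = true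
instance (rows_with_dates_colors : List (List (String × String))) : Decidable (Pre_generate_date_color_count rows_with_dates_colors) := by unfold Pre_generate_date_color_count; infer_instance

def pvWitness_generate_date_color_count : (List (List (String × String))) :=
  [[("date", "2024-01-01"), ("color", "red")],
   [("date", "2024-01-01"), ("color", "red")],
   [("date", "2024-01-01"), ("color", "blue")],
   [("date", "2024-01-02"), ("color", "red")]]

def Spec_generate_date_color_count (rows_with_dates_colors : List (List (String × String))) (out : List (String × List (String × Int))) : Prop := out = generate_date_color_count_alt rows_with_dates_colors
instance (rows_with_dates_colors : List (List (String × String))) (out : List (String × List (String × Int))) : Decidable (Spec_generate_date_color_count rows_with_dates_colors out) := by unfold Spec_generate_date_color_count; infer_instance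

-- ===== CLAIM (what is proved, stated in full; the proofs are below) =====
def Claim_equal_generate_date_color_count : Prop := ∀ (rows_with_dates_colors : List (List (String × String))), Dom_generate_date_color_count rows_with_dates_colors → Pre_generate_date_color_count rows_with_dates_colors → Spec_generate_date_color_count rows_with_dates_colors (generate_date_color_count rows_with_dates_colors)

-- ===== LEMMAS AND PROOFS =====

-- abbreviations for the two loop bodies (on the pair level)
def pvDD : Type := PySem.Dict String (PySem.Dict String Int)

def pvStepA (acc : pvDD) (p : String × String) : pvDD :=
  let acc1 := if acc.contains p.1 then acc else acc.insert p.1 PySem.Dict.empty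
  let inner := acc1.getD p.1 PySem.Dict.empty
  if inner.contains p.2 then
    acc1.insert p.1 (inner.insert p.2 (inner.getD p.2 0 + 1))
  else
    acc1.insert p.1 (inner.insert p.2 1)

def pvStepU (acc : pvDD) (p : String × String) : pvDD :=
  acc.insert p.1 ((acc.getD p.1 PySem.Dict.empty).insert p.2
    ((acc.getD p.1 PySem.Dict.empty).getD p.2 0 + 1))

def pvStepN (acc : pvDD) (q : (String × String) × Int) : pvDD :=
  acc.insert q.1.1 ((acc.getD q.1.1 PySem.Dict.empty).insert q.1.2 q.2)

def pvBump (p : String × String) (m : Int) (N : pvDD) : pvDD :=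
  N.insert p.1 ((N.getD p.1 PySem.Dict.empty).insert p.2 m)

theorem pvStepA_eq (acc : pvDD) (p : String × String) : pvStepA acc p = pvStepU acc p := by
  unfold pvStepA pvStepU
  by_cases h : acc.contains p.1 = true
  · simp only [h, if_true]
    by_cases hc : (acc.getD p.1 PySem.Dict.empty).contains p.2 = true
    · simp only [hc, if_true]
    · simp [hc, PySem.Dict.getD_of_not_contains _ _ (Bool.not_eq_true _ ▸ hc)]
  · have h' : acc.contains p.1 = false := Bool.not_eq_true _ ▸ h
    simp [h', PySem.Dict.getD_insert_self, PySem.Dict.contains_empty,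
      PySem.Dict.getD_empty, PySem.Dict.insert_insert_self,
      PySem.Dict.getD_of_not_contains _ _ h']

-- insert at two different keys commutes when the first key is already present
theorem pvInsertComm {κ ν : Type} [BEq κ] [LawfulBEq κ] (d : PySem.Dict κ ν) (k k' : κ) (v w : ν)
    (hne : k' ≠ k) (hk : d.contains k = true) :
    (d.insert k v).insert k' w = (d.insert k' w).insert k v := by
  apply PySem.Dict.ext
  have hkk' : (k == k') = false := by simp [beq_eq_false_iff_ne]; exact fun h => hne h.symm
  have hk'k : (k' == k) = false := by simp [beq_eq_false_iff_ne, hne]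
  have hck : (d.insert k' w).contains k = true := by
    rw [PySem.Dict.contains_insert]; simp [hk, hkk']
  by_cases hk' : d.contains k' = true
  · have hck' : (d.insert k v).contains k' = true := by
      rw [PySem.Dict.contains_insert]; simp [hk', hk'k]
    rw [PySem.Dict.items_insert_of_contains _ w hck',
        PySem.Dict.items_insert_of_contains _ v hk,
        PySem.Dict.items_insert_of_contains _ v hck,
        PySem.Dict.items_insert_of_contains _ w hk']
    rw [List.map_map, List.map_map]
    apply List.map_congr_left
    intro p _
    by_cases h1 : (p.1 == k) = true
    · have e := eq_of_beq h1
      subst e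
      simp [hkk']
    · by_cases h2 : (p.1 == k') = true
      · simp [h1, h2, hk'k]
      · simp [h1, h2]
  · have hck' : (d.insert k v).contains k' = false := by
      rw [PySem.Dict.contains_insert]; simp [hk'k]
      exact Bool.not_eq_true _ ▸ hk'
    rw [PySem.Dict.items_insert_of_not_contains _ w hck',
        PySem.Dict.items_insert_of_contains _ v hk,
        PySem.Dict.items_insert_of_contains _ v hck,
        PySem.Dict.items_insert_of_not_contains _ w (Bool.not_eq_true _ ▸ hk')]
    rw [List.map_append]
    simp [hk'k]

-- getD through the nest fold reads the filtered inner fold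
theorem pvNestGetD (L : List ((String × String) × Int)) (N : pvDD) (d : String) :
    (L.foldl pvStepN N).getD d PySem.Dict.empty =
      (L.filter (fun q => q.1.1 == d)).foldl
        (fun inn q => inn.insert q.1.2 q.2) (N.getD d PySem.Dict.empty) := by
  induction L generalizing N with
  | nil => simp
  | cons q L ih =>
    simp only [List.foldl_cons, List.filter_cons]
    by_cases h : (q.1.1 == d) = true
    · have e := eq_of_beq h
      rw [ih]
      simp only [h, if_true, List.foldl_cons]
      rw [pvStepN, e, PySem.Dict.getD_insert_self]
    · have e : d ≠ q.1.1 := fun he => h (by simp [he])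
      rw [ih]
      simp only [h]
      simp only [Bool.false_eq_true, if_false]
      rw [pvStepN, PySem.Dict.getD_insert_of_ne _ _ _ e]

theorem pvInnerUntouched (M : List ((String × String) × Int)) (inn0 : PySem.Dict String Int)
    (c : String) (h : ∀ q ∈ M, q.1.2 ≠ c) :
    (M.foldl (fun inn q => inn.insert q.1.2 q.2) inn0).getD c 0 = inn0.getD c 0 := by
  induction M generalizing inn0 with
  | nil => rfl
  | cons q M ih =>
    simp only [List.foldl_cons]
    rw [ih _ (fun r hr => h r (List.mem_cons_of_mem _ hr)),
        PySem.Dict.getD_insert_of_ne _ _ _ (Ne.symm (h q (List.mem_cons_self)))]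

theorem pvSwap (p : String × String) (m : Int) (q : (String × String) × Int)
    (N : pvDD) (hq : q.1 ≠ p)
    (h1 : N.contains p.1 = true) (h2 : (N.getD p.1 PySem.Dict.empty).contains p.2 = true) :
    pvStepN (pvBump p m N) q = pvBump p m (pvStepN N q) := by
  unfold pvStepN pvBump
  by_cases hd : q.1.1 = p.1
  · have hc2 : q.1.2 ≠ p.2 := by
      intro hc; exact hq (Prod.ext hd hc)
    rw [hd, PySem.Dict.getD_insert_self, PySem.Dict.insert_insert_self,
        PySem.Dict.getD_insert_self, PySem.Dict.insert_insert_self,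
        pvInsertComm _ _ _ _ _ hc2 h2]
  · rw [PySem.Dict.getD_insert_of_ne _ _ _ hd,
        PySem.Dict.getD_insert_of_ne _ _ _ (fun he => hd he.symm),
        pvInsertComm _ _ _ _ _ hd h1]

theorem pvComm (p : String × String) (m : Int) (L2 : List ((String × String) × Int)) :
    ∀ N : pvDD, p ∉ L2.map (fun q => q.1) →
    N.contains p.1 = true → (N.getD p.1 PySem.Dict.empty).contains p.2 = true →
    L2.foldl pvStepN (pvBump p m N) = pvBump p m (L2.foldl pvStepN N) := by
  induction L2 with
  | nil => intro N _ _ _; rfl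
  | cons q L2 ih =>
    intro N hmem h1 h2
    have hq : q.1 ≠ p := by
      intro he; exact hmem (by simp [he])
    have hmem' : p ∉ L2.map (fun q => q.1) := by
      intro hx; exact hmem (List.mem_cons_of_mem _ hx)
    have h1' : (pvStepN N q).contains p.1 = true := by
      rw [pvStepN, PySem.Dict.contains_insert]; simp [h1]
    have h2' : ((pvStepN N q).getD p.1 PySem.Dict.empty).contains p.2 = true := by
      rw [pvStepN]
      by_cases hd : p.1 = q.1.1
      · rw [hd, PySem.Dict.getD_insert_self, PySem.Dict.contains_insert]
        rw [← hd]; simp [h2]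
      · rw [PySem.Dict.getD_insert_of_ne _ _ _ hd]; exact h2
    simp only [List.foldl_cons]
    rw [pvSwap p m q N hq h1 h2, ih _ hmem' h1' h2']

theorem pvStepU_eq_bump (X : pvDD) (p : String × String) :
    pvStepU X p = pvBump p ((X.getD p.1 PySem.Dict.empty).getD p.2 0 + 1) X := rfl

theorem pvStepN_eq_bump (X : pvDD) (q : (String × String) × Int) :
    pvStepN X q = pvBump q.1 q.2 X := rfl

-- the nested fold holds exactly the pair counts
theorem pvXval (ps : List (String × String)) (p : String × String) :
    (((PySem.Dict.counter ps).items.foldl pvStepN PySem.Dict.empty).getD p.1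
        PySem.Dict.empty).getD p.2 0 = (ps.count p : Int) := by
  rw [pvNestGetD, PySem.Dict.getD_empty]
  rw [PySem.Dict.items_counter, List.filter_map]
  by_cases hmem : p ∈ ps
  · have hS : p ∈ PySem.Set.ofList ps := (PySem.Set.mem_ofList ps p).mpr hmem
    have hT : p ∈ (PySem.Set.ofList ps).filter
        ((fun q => q.1.1 == p.1) ∘ (fun k => (k, (ps.count k : Int)))) := by
      simp [List.mem_filter, Function.comp, hS]
    obtain ⟨T1, T2, hdec⟩ := List.append_of_mem hT
    have hnd : ((PySem.Set.ofList ps).filter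
        ((fun q => q.1.1 == p.1) ∘ (fun k => (k, (ps.count k : Int))))).Nodup :=
      (PySem.Set.nodup_ofList ps).filter _
    rw [hdec] at hnd ⊢
    have hp2 : p ∉ T2 := by
      have := hnd.of_append_right
      exact (List.nodup_cons.mp this).1
    rw [List.map_append, List.map_cons, List.foldl_append, List.foldl_cons]
    rw [pvInnerUntouched]
    · exact PySem.Dict.getD_insert_self _ _ _ _
    · intro q hq
      simp only [List.mem_map] at hq
      obtain ⟨k, hk, hfk⟩ := hq
      intro hc
      apply hp2
      have hkf : k ∈ (PySem.Set.ofList ps).filter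
          ((fun q => q.1.1 == p.1) ∘ (fun k => (k, (ps.count k : Int)))) := by
        rw [hdec]; exact List.mem_append_right _ (List.mem_cons_of_mem _ hk)
      have hk1 : k.1 = p.1 := by
        have := List.of_mem_filter hkf
        simpa [Function.comp] using this
      have hk2 : k.2 = p.2 := by rw [← hfk] at hc; simpa using hc
      have : k = p := Prod.ext hk1 hk2
      rwa [← this]
  · rw [pvInnerUntouched, PySem.Dict.getD_empty, List.count_eq_zero.mpr hmem]
    · rfl
    · intro q hq
      simp only [List.mem_map] at hq
      obtain ⟨k, hk, hfk⟩ := hq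
      intro hc
      apply hmem
      have hk1 : k.1 = p.1 := by
        have := List.of_mem_filter hk
        simpa [Function.comp] using this
      have hk2 : k.2 = p.2 := by rw [← hfk] at hc; simpa using hc
      have hkp : k = p := Prod.ext hk1 hk2
      have : k ∈ PySem.Set.ofList ps := List.mem_of_mem_filter hk
      rw [hkp] at this
      exact (PySem.Set.mem_ofList ps p).mp this

-- the main pair-level theorem
theorem pvMain (ps : List (String × String)) :
    ps.foldl pvStepU PySem.Dict.empty =
      (PySem.Dict.counter ps).items.foldl pvStepN PySem.Dict.empty := by
  induction ps using List.reverseRecOn with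
  | nil => rfl
  | append_singleton ps p ih =>
    rw [List.foldl_append, List.foldl_cons, List.foldl_nil, ih]
    rw [PySem.Dict.counter_append_singleton, PySem.Dict.modify, PySem.Dict.getD_counter]
    by_cases hmem : p ∈ ps
    · have hc : (PySem.Dict.counter ps).contains p = true := by
        rw [PySem.Dict.contains_counter]; simpa using hmem
      rw [PySem.Dict.items_insert_of_contains _ _ hc]
      have hpL : (p, (ps.count p : Int)) ∈ (PySem.Dict.counter ps).items := by
        rw [PySem.Dict.items_counter]
        exact List.mem_map.mpr ⟨p, (PySem.Set.mem_ofList ps p).mpr hmem, rfl⟩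
      obtain ⟨L1, L2, hdec⟩ := List.append_of_mem hpL
      have hndk : ((PySem.Dict.counter ps).items.map (fun q => q.1)).Nodup := by
        have : (PySem.Dict.counter ps).items.map (fun q => q.1)
            = (PySem.Dict.counter ps).keys := rfl
        rw [this, PySem.Dict.keys_counter]
        exact PySem.Set.nodup_ofList ps
      rw [hdec] at hndk
      rw [List.map_append, List.map_cons] at hndk
      have hp1 : p ∉ L1.map (fun q => q.1) := by
        have := List.disjoint_of_nodup_append hndk
        intro hx; exact this hx (List.mem_cons_self)
      have hp2 : p ∉ L2.map (fun q => q.1) := by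
        have := hndk.of_append_right
        exact (List.nodup_cons.mp this).1
      rw [hdec, List.map_append, List.map_cons]
      have hL1 : L1.map (fun q => if (q.1 == p) = true then (p, (ps.count p : Int) + 1) else q)
          = L1 := by
        conv_rhs => rw [← List.map_id L1]
        apply List.map_congr_left
        intro q hq
        have : (q.1 == p) = false := by
          simp only [beq_eq_false_iff_ne]
          intro he; exact hp1 (List.mem_map.mpr ⟨q, hq, he⟩)
        simp [this]
      have hL2 : L2.map (fun q => if (q.1 == p) = true then (p, (ps.count p : Int) + 1) else q)
          = L2 := by
        conv_rhs => rw [← List.map_id L2]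
        apply List.map_congr_left
        intro q hq
        have : (q.1 == p) = false := by
          simp only [beq_eq_false_iff_ne]
          intro he; exact hp2 (List.mem_map.mpr ⟨q, hq, he⟩)
        simp [this]
      rw [hL1, hL2]
      simp only [beq_self_eq_true, if_true]
      rw [List.foldl_append, List.foldl_cons, List.foldl_append, List.foldl_cons]
      have hbump : pvStepN (L1.foldl pvStepN PySem.Dict.empty) (p, (ps.count p : Int) + 1)
          = pvBump p ((ps.count p : Int) + 1)
              (pvStepN (L1.foldl pvStepN PySem.Dict.empty) (p, (ps.count p : Int))) := by
        unfold pvStepN pvBump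
        rw [PySem.Dict.getD_insert_self, PySem.Dict.insert_insert_self,
            PySem.Dict.insert_insert_self]
      rw [hbump]
      rw [pvComm p _ L2 _ hp2
        (by rw [pvStepN, PySem.Dict.contains_insert]; simp)
        (by rw [pvStepN, PySem.Dict.getD_insert_self, PySem.Dict.contains_insert]; simp)]
      rw [← List.foldl_cons, ← List.foldl_append, ← hdec]
      rw [pvStepU_eq_bump, pvXval]
    · have hc : (PySem.Dict.counter ps).contains p = false := by
        rw [PySem.Dict.contains_counter]; simpa using hmem
      rw [PySem.Dict.items_insert_of_not_contains _ _ hc]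
      rw [List.foldl_append, List.foldl_cons, List.foldl_nil]
      rw [pvStepU_eq_bump, pvStepN_eq_bump, pvXval, List.count_eq_zero.mpr hmem]

theorem generate_date_color_count_spec : Claim_equal_generate_date_color_count := by
  intro rows _ _
  show generate_date_color_count rows = generate_date_color_count_alt rows
  have hA : generate_date_color_count rows
      = ((rows.map (fun row => (pvRowGet row "date", pvRowGet row "color"))).foldl pvStepU
          PySem.Dict.empty).items.map (fun p => (p.1, p.2.items)) := by
    unfold generate_date_color_count
    rw [List.foldl_map]
    have hfun : (fun (acc : pvDD) (row : List (String × String)) =>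
          pvStepA acc (pvRowGet row "date", pvRowGet row "color"))
        = (fun (acc : pvDD) (row : List (String × String)) =>
          pvStepU acc (pvRowGet row "date", pvRowGet row "color")) :=
      funext fun acc => funext fun row => pvStepA_eq acc _
    show (List.foldl (fun (acc : pvDD) (row : List (String × String)) =>
        pvStepA acc (pvRowGet row "date", pvRowGet row "color"))
        PySem.Dict.empty rows).items.map (fun p => (p.1, p.2.items)) = _
    rw [hfun]
  have hB : generate_date_color_count_alt rows
      = ((PySem.Dict.counter
            (rows.map (fun row => (pvRowGet row "date", pvRowGet row "color")))).items.foldl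
          pvStepN PySem.Dict.empty).items.map (fun p => (p.1, p.2.items)) := by
    unfold generate_date_color_count_alt
    dsimp only
    rw [PySem.Dict.foldl_insert_getD_add_one_eq_counter]
    rfl
  rw [hA, hB, pvMain]
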